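-- pv_equiv track=rewrite | github.com/Another-Person1/CCC-Solutions | troublesomekeys1.py | find_troublesome_keys
-- ===== SOURCE A (Python) =====
-- def find_troublesome_keys(pressed_keys, displayed_keys):
--     silly_key = ''
--     quiet_key = '-'
--     wrong_letter = ''
--     for i in range(len(pressed_keys)):
--         if pressed_keys[i] != displayed_keys[i]:
--             if silly_key == '':
--                 silly_key = pressed_keys[i]
--                 wrong_letter = displayed_keys[i]
--             elif pressed_keys[i] != silly_key:
--                 quiet_key = pressed_keys[i]
--     return silly_key, wrong_letter, quiet_key
-- ===== SOURCE B (Python) =====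
-- def find_troublesome_keys(pressed_keys, displayed_keys):
--     n = len(pressed_keys)
--     # Phase 1: forward scan to the first mismatch.
--     i = 0
--     while i < n and pressed_keys[i] == displayed_keys[i]:
--         i += 1
--     if i == n:
--         return '', '', '-'
--     silly_key = pressed_keys[i]
--     wrong_letter = displayed_keys[i]
--     # Phase 2: backward scan from the end, stopping at the first
--     # mismatch whose pressed char differs from silly_key.
--     quiet_key = '-'
--     j = n - 1
--     while j > i:
--         p = pressed_keys[j]
--         if p != displayed_keys[j] and p != silly_key:
--             quiet_key = p
--             break
--         j -= 1
--     return silly_key, wrong_letter, quiet_key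
-- ===== Notes on version B (the rewrite author's own statement) =====
-- stated objective: alternative
-- what changed: Replaces A's single full forward pass with an if/elif state machine by two early-exit scans: a forward scan that stops at the first mismatch (giving silly_key and wrong_letter), then a backward scan from the end that breaks at the first mismatch whose pressed char differs from silly_key (giving quiet_key, correct because the quiet key is the LAST such mismatch, i.e. the first seen from the right).
import Mathlib
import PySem

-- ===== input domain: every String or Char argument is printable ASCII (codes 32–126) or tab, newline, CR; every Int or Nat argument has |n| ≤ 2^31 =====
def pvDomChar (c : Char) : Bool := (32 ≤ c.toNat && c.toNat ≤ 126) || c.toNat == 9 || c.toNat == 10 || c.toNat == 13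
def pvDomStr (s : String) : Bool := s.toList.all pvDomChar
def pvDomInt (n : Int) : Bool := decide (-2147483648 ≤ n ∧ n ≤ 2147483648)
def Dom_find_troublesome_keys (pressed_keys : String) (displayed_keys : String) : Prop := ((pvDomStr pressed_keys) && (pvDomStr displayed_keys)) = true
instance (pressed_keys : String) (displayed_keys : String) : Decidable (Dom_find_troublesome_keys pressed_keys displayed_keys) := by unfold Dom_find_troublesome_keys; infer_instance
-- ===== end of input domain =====

-- B replaces A's single forward pass with a state machine by two scans: forward to the first
-- mismatch (silly_key, wrong_letter), then a backward early-exit scan for quiet_key; same cost.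


-- ===== PORT A =====
-- A's for-loop over i, indexing both strings; state (silly_key, wrong_letter, quiet_key).
-- The (_ :: _, []) case is where Python raises IndexError (excluded by Pre_).
def goA : List Char → List Char → String → String → String → String × String × String
  | [], _, s, w, q => (s, w, q)
  | _ :: _, [], s, w, q => (s, w, q)
  | p :: ps, d :: ds, s, w, q =>
    if p ≠ d then
      if s = "" then goA ps ds (String.ofList [p]) (String.ofList [d]) q
      else if String.ofList [p] ≠ s then goA ps ds s w (String.ofList [p])
      else goA ps ds s w q
    else goA ps ds s w q

def find_troublesome_keys (pressed_keys : String) (displayed_keys : String) : String × String × String :=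
  goA pressed_keys.toList displayed_keys.toList "" "" "-"

-- ===== PORT B =====
-- Phase 1: B's forward while-loop dropping equal (pressed, displayed) positions until the first
-- mismatch; returns the mismatching pair and the remaining suffixes (none = no mismatch).
def firstMis : List Char → List Char → Option (Char × Char × List Char × List Char)
  | [], _ => none
  | _ :: _, [] => none   -- Python would raise IndexError here; excluded by Pre_
  | p :: ps, d :: ds => if p = d then firstMis ps ds else some (p, d, ps, ds)

-- Phase 2: B's backward while-loop with break, transcribed as a scan over the REVERSED suffix:
-- return at the first mismatching pair whose pressed char differs from silly_key.
def quietScan : List (Char × Char) → Char → String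
  | [], _ => "-"
  | (p, d) :: rest, sc =>
    if p ≠ d ∧ p ≠ sc then String.ofList [p] else quietScan rest sc

def find_troublesome_keys_alt (pressed_keys : String) (displayed_keys : String) : String × String × String :=
  match firstMis pressed_keys.toList displayed_keys.toList with
  | none => ("", "", "-")
  | some (p, d, ps, ds) =>
    (String.ofList [p], String.ofList [d], quietScan (ps.zip ds).reverse p)

-- ===== PRECONDITION & SPEC =====
-- Pre_ excludes exactly the inputs where Python A raises IndexError: displayed_keys shorter than pressed_keys.
def Pre_find_troublesome_keys (pressed_keys : String) (displayed_keys : String) : Prop :=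
  pressed_keys.toList.length ≤ displayed_keys.toList.length
instance (pressed_keys : String) (displayed_keys : String) : Decidable (Pre_find_troublesome_keys pressed_keys displayed_keys) := by unfold Pre_find_troublesome_keys; infer_instance
def pvWitness_find_troublesome_keys : String × String := ("abcb", "axcz")

def Spec_find_troublesome_keys (pressed_keys : String) (displayed_keys : String) (out : String × String × String) : Prop := out = find_troublesome_keys_alt pressed_keys displayed_keys
instance (pressed_keys : String) (displayed_keys : String) (out : String × String × String) : Decidable (Spec_find_troublesome_keys pressed_keys displayed_keys out) := by unfold Spec_find_troublesome_keys; infer_instance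

-- ===== CLAIM (what is proved, stated in full; the proofs are below) =====
def Claim_equal_find_troublesome_keys : Prop := ∀ (pressed_keys : String) (displayed_keys : String), Dom_find_troublesome_keys pressed_keys displayed_keys → Pre_find_troublesome_keys pressed_keys displayed_keys → Spec_find_troublesome_keys pressed_keys displayed_keys (find_troublesome_keys pressed_keys displayed_keys)

-- ===== LEMMAS AND PROOFS =====

theorem single_inj (a b : Char) : String.ofList [a] = String.ofList [b] ↔ a = b := by
  constructor
  · intro h
    have := congrArg String.toList h
    simp at this
    exact this
  · intro h; rw [h]

-- quietScan with an explicit default value (base case generalized), for the fold lemma.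
def quietScanD : List (Char × Char) → Char → String → String
  | [], _, q => q
  | (p, d) :: rest, sc, q =>
    if p ≠ d ∧ p ≠ sc then String.ofList [p] else quietScanD rest sc q

theorem quietScanD_default (l : List (Char × Char)) (sc : Char) :
    quietScanD l sc "-" = quietScan l sc := by
  induction l with
  | nil => rfl
  | cons a t ih => cases a; simp [quietScan, quietScanD, ih]

theorem quietScanD_append (xs : List (Char × Char)) (a : Char × Char) (sc : Char) (q : String) :
    quietScanD (xs ++ [a]) sc q
      = quietScanD xs sc (if a.1 ≠ a.2 ∧ a.1 ≠ sc then String.ofList [a.1] else q) := by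
  induction xs with
  | nil => cases a; simp [quietScanD]
  | cons x t ih => cases x; simp [quietScanD, ih]

-- The left fold A effectively performs on the suffix equals B's scan of the reversed suffix.
theorem foldl_eq_quietScanD (l : List (Char × Char)) (sc : Char) (q : String) :
    l.foldl (fun q x => if x.1 ≠ x.2 ∧ x.1 ≠ sc then String.ofList [x.1] else q) q
      = quietScanD l.reverse sc q := by
  induction l generalizing q with
  | nil => rfl
  | cons a t ih =>
    cases a with
    | mk p d =>
      rw [List.foldl_cons, List.reverse_cons, quietScanD_append]
      exact ih _

-- After silly_key is set to ⟨[sc]⟩, A only updates quiet_key, via this fold over the zip.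
theorem goA_set (ps ds : List Char) (sc : Char) (w q : String) :
    goA ps ds (String.ofList [sc]) w q =
      (String.ofList [sc], w,
        (ps.zip ds).foldl
          (fun q x => if x.1 ≠ x.2 ∧ x.1 ≠ sc then String.ofList [x.1] else q) q) := by
  induction ps generalizing ds q with
  | nil => simp [goA]
  | cons p ps ih =>
    cases ds with
    | nil => simp [goA]
    | cons d ds =>
      by_cases hpd : p = d
      · simp [goA, hpd, ih]
      · by_cases hps : p = sc
        · subst hps
          simp [goA, hpd, ih]
        · simp [goA, hpd, single_inj, hps, ih]

theorem goA_alt (ps ds : List Char) :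
    goA ps ds "" "" "-" =
      (match firstMis ps ds with
       | none => ("", "", "-")
       | some (p, d, ps', ds') =>
         (String.ofList [p], String.ofList [d], quietScan (ps'.zip ds').reverse p)) := by
  induction ps generalizing ds with
  | nil => simp [goA, firstMis]
  | cons p ps ih =>
    cases ds with
    | nil => simp [goA, firstMis]
    | cons d ds =>
      by_cases hpd : p = d
      · simpa [goA, hpd, firstMis] using ih ds
      · have hA : goA (p :: ps) (d :: ds) "" "" "-"
            = goA ps ds (String.ofList [p]) (String.ofList [d]) "-" := by
          simp [goA, hpd]
        rw [hA, goA_set, foldl_eq_quietScanD, quietScanD_default]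
        simp [firstMis, hpd]

-- ===== VERDICT (by name: the statement is the Claim_ definition above) =====
theorem find_troublesome_keys_spec : Claim_equal_find_troublesome_keys := by
  intro pk dk _ _
  unfold Spec_find_troublesome_keys find_troublesome_keys find_troublesome_keys_alt
  rw [goA_alt]
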